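-- pv_equiv track=rewrite | github.com/loadingsjy/algorithm | string/minOps.py | divsSumAndCount
-- ===== SOURCE A (Python) =====
-- def divsSumAndCount(n):
--     primeSum = 0
--     count = 0
--     for i in range(2, n + 1):
--         while n % i == 0:
--             primeSum += i
--             count += 1
--             n //= i
--
--     return primeSum, count
-- ===== SOURCE B (Python) =====
-- def divsSumAndCount(n):
--     primeSum = 0
--     count = 0
--     m = n
--     d = 2
--     while d * d <= m:
--         if m % d == 0:
--             primeSum += d
--             count += 1
--             m //= d
--         else:
--             d += 1
--     if m > 1:
--         primeSum += m
--         count += 1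
--     return primeSum, count
-- ===== Notes on version B (the rewrite author's own statement) =====
-- stated objective: faster
-- what changed: B trial-divides only up to sqrt of the remaining cofactor and adds the single remaining prime factor at the end, instead of A's scan of every candidate divisor up to n.
import Mathlib
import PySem

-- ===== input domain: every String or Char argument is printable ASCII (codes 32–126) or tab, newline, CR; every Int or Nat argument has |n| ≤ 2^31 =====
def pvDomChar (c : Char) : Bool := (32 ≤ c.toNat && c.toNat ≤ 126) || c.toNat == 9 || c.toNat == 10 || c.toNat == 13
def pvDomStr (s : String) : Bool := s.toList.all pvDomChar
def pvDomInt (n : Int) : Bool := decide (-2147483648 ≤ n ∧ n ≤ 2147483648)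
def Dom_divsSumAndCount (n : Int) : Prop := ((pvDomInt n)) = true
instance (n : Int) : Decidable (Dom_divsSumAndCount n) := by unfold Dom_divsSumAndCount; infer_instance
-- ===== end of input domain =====

-- B replaces A's scan of every candidate divisor up to n by trial division only up to
-- the square root of the remaining cofactor, adding the one remaining prime at the end (objective: faster).

-- ===== PORT A =====
-- inner `while n % i == 0` loop of A; fuel m.toNat + 1 is enough on every state A reaches
def pvWhileA (fuel : Nat) (i s c m : Int) : Int × Int × Int :=
  match fuel with
  | 0 => (s, c, m)
  | f + 1 =>
    if PySem.Int.mod m i = 0 then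
      pvWhileA f i (s + i) (c + 1) (PySem.Int.floordiv m i)
    else (s, c, m)

def divsSumAndCount (n : Int) : List Int :=
  let r := (PySem.List.pyRange 2 (n + 1) 1).foldl
    (fun st i => pvWhileA (st.2.2.toNat + 1) i st.1 st.2.1 st.2.2) (0, 0, n)
  [r.1, r.2.1]

-- ===== PORT B =====
-- the `while d*d <= m` loop of B; fuel n.toNat + 1 is enough on every state B reaches
def pvLoopB (fuel : Nat) (d m s c : Int) : Int × Int × Int :=
  match fuel with
  | 0 => (s, c, m)
  | f + 1 =>
    if d * d ≤ m then
      if PySem.Int.mod m d = 0 then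
        pvLoopB f d (PySem.Int.floordiv m d) (s + d) (c + 1)
      else
        pvLoopB f (d + 1) m s c
    else (s, c, m)

def divsSumAndCount_alt (n : Int) : List Int :=
  let r := pvLoopB (n.toNat + 1) 2 n 0 0
  if 1 < r.2.2 then [r.1 + r.2.2, r.2.1 + 1] else [r.1, r.2.1]

-- ===== PRECONDITION & SPEC =====
def Spec_divsSumAndCount (n : Int) (out : List Int) : Prop := out = divsSumAndCount_alt n
instance (n : Int) (out : List Int) : Decidable (Spec_divsSumAndCount n out) := by unfold Spec_divsSumAndCount; infer_instance

-- ===== CLAIM (what is proved, stated in full; the proofs are below) =====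
def Claim_equal_divsSumAndCount : Prop := ∀ (n : Int), Dom_divsSumAndCount n → Spec_divsSumAndCount n (divsSumAndCount n)

-- ===== LEMMAS AND PROOFS =====

-- reference value: (sum, count) of the prime factorization, by repeated minFac division
def pvSpec (m : Nat) : Int × Int :=
  if h : m ≤ 1 then (0, 0)
  else
    let r := pvSpec (m / m.minFac)
    ((m.minFac : Int) + r.1, r.2 + 1)
decreasing_by
  exact Nat.div_lt_self (by omega) (Nat.minFac_prime (by omega)).two_le

theorem pvSpec_one : pvSpec 1 = (0, 0) := by rw [pvSpec]; simp

theorem minFac_eq_of (M I : Nat) (hI : 2 ≤ I) (hd : I ∣ M) (hM : 2 ≤ M)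
    (hmin : ∀ k, 2 ≤ k → k < I → ¬ k ∣ M) : M.minFac = I := by
  have h1 : M.minFac ≤ I := Nat.minFac_le_of_dvd hI hd
  have h2 : 2 ≤ M.minFac := (Nat.minFac_prime (by omega)).two_le
  have h3 : M.minFac ∣ M := Nat.minFac_dvd M
  rcases lt_or_eq_of_le h1 with h | h
  · exact absurd h3 (hmin _ h2 h)
  · exact h

theorem pvSpec_step (M I : Nat) (hI : 2 ≤ I) (hd : I ∣ M) (hM : 2 ≤ M)
    (hmin : ∀ k, 2 ≤ k → k < I → ¬ k ∣ M) :
    pvSpec M = ((I : Int) + (pvSpec (M / I)).1, (pvSpec (M / I)).2 + 1) := by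
  rw [pvSpec]
  rw [minFac_eq_of M I hI hd hM hmin]
  simp [show ¬ M ≤ 1 by omega]

theorem whileA_spec : ∀ (fuel I M : Nat) (s c : Int), 2 ≤ I → 1 ≤ M → M ≤ fuel →
    (∀ k, 2 ≤ k → k < I → ¬ k ∣ M) →
    ∃ M' : Nat, pvWhileA fuel (I : Int) s c (M : Int) =
        (s + (pvSpec M).1 - (pvSpec M').1, c + (pvSpec M).2 - (pvSpec M').2, (M' : Int)) ∧
      1 ≤ M' ∧ M' ≤ M ∧ M' ∣ M ∧ (∀ k, 2 ≤ k → k < I + 1 → ¬ k ∣ M') := by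
  intro fuel
  induction fuel with
  | zero => intro I M s c hI hM hf _; omega
  | succ f ih =>
    intro I M s c hI hM hf hmin
    by_cases hdvd : I ∣ M
    · have hmod : PySem.Int.mod (M : Int) (I : Int) = 0 := by
        rw [PySem.Int.mod_eq_zero_iff_dvd]
        exact_mod_cast hdvd
      have hfd : PySem.Int.floordiv (M : Int) (I : Int) = ((M / I : Nat) : Int) :=
        PySem.Int.floordiv_natCast M I
      have hIM : I ≤ M := Nat.le_of_dvd (by omega) hdvd
      have h1 : 1 ≤ M / I := (Nat.one_le_div_iff (by omega)).mpr hIM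
      have hlt : M / I < M := Nat.div_lt_self (by omega) (by omega)
      have hmin' : ∀ k, 2 ≤ k → k < I → ¬ k ∣ M / I := by
        intro k hk2 hkI hkd
        exact hmin k hk2 hkI (hkd.trans (Nat.div_dvd_of_dvd hdvd))
      obtain ⟨M', heq, h1', hle', hdvd', hmin''⟩ :=
        ih I (M / I) (s + I) (c + 1) hI h1 (by omega) hmin'
      refine ⟨M', ?_, h1', by omega, hdvd'.trans (Nat.div_dvd_of_dvd hdvd), hmin''⟩
      rw [pvWhileA, if_pos hmod, hfd, heq,
        pvSpec_step M I hI hdvd (by omega) hmin]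
      simp [Prod.ext_iff]
      constructor <;> ring
    · have hmod : ¬ PySem.Int.mod (M : Int) (I : Int) = 0 := by
        rw [PySem.Int.mod_eq_zero_iff_dvd]
        exact_mod_cast hdvd
      refine ⟨M, ?_, hM, le_refl M, dvd_refl M, ?_⟩
      · rw [pvWhileA, if_neg hmod]
        simp
      · intro k hk2 hkI
        by_cases hkI' : k < I
        · exact hmin k hk2 hkI'
        · have : k = I := by omega
          rw [this]; exact hdvd

theorem foldA_spec : ∀ (len L : Nat) (s c : Int) (M : Nat), 2 ≤ L → 1 ≤ M → M < L + len →
    (∀ k, 2 ≤ k → k < L → ¬ k ∣ M) →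
    (PySem.List.pyRange (L : Int) ((L : Int) + (len : Int)) 1).foldl
      (fun st i => pvWhileA (st.2.2.toNat + 1) i st.1 st.2.1 st.2.2) (s, c, (M : Int))
      = (s + (pvSpec M).1, c + (pvSpec M).2, 1) := by
  intro len
  induction len with
  | zero =>
    intro L s c M hL hM hlt hmin
    have hM1 : M = 1 := by
      by_contra h
      exact hmin M (by omega) (by omega) (dvd_refl M)
    subst hM1
    simp [pvSpec_one]
  | succ len ih =>
    intro L s c M hL hM hlt hmin
    rw [PySem.List.pyRange_one_cons (by push_cast; omega : (L : Int) < (L : Int) + ((len + 1 : Nat) : Int))]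
    rw [List.foldl_cons]
    obtain ⟨M', heq, h1', hle', _, hmin'⟩ :=
      whileA_spec (M + 1) L M s c hL hM (by omega) hmin
    have hred : pvWhileA ((s, c, (M : Int)).2.2.toNat + 1) (L : Int) (s, c, (M : Int)).1
        (s, c, (M : Int)).2.1 (s, c, (M : Int)).2.2
        = (s + (pvSpec M).1 - (pvSpec M').1, c + (pvSpec M).2 - (pvSpec M').2, (M' : Int)) := by
      show pvWhileA ((M : Int).toNat + 1) (L : Int) s c (M : Int) = _
      rw [Int.toNat_natCast]
      exact heq
    rw [hred]
    have hrange : (PySem.List.pyRange ((L : Int) + 1) ((L : Int) + ((len + 1 : Nat) : Int)) 1)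
        = PySem.List.pyRange (((L + 1 : Nat)) : Int) (((L + 1 : Nat) : Int) + ((len : Nat) : Int)) 1 := by
      push_cast; ring_nf
    rw [hrange]
    rw [ih (L + 1) _ _ M' (by omega) h1' (by omega) hmin']
    simp

-- exit analysis of B's loop: when d*d > m and m has no factor below d, m is 1 or prime
theorem exitB (D M : Nat) (_hD : 2 ≤ D) (hM : 1 ≤ M) (hlt : M < D * D)
    (hmin : ∀ k, 2 ≤ k → k < D → ¬ k ∣ M) :
    M = 1 ∨ (2 ≤ M ∧ pvSpec M = ((M : Int), 1)) := by
  by_cases h1 : M = 1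
  · exact Or.inl h1
  · right
    have hM2 : 2 ≤ M := by omega
    have hprime : M.Prime := by
      by_contra hnp
      have hp2 : 2 ≤ M.minFac := (Nat.minFac_prime h1).two_le
      have hpd : M.minFac ∣ M := Nat.minFac_dvd M
      have hDp : D ≤ M.minFac := by
        by_contra h
        exact hmin M.minFac hp2 (by omega) hpd
      have hsq : M.minFac ^ 2 ≤ M := Nat.minFac_sq_le_self (by omega) hnp
      have : D * D ≤ M.minFac * M.minFac := Nat.mul_le_mul hDp hDp
      nlinarith [sq_nonneg M.minFac]
    refine ⟨hM2, ?_⟩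
    rw [pvSpec]
    rw [hprime.minFac_eq]
    simp [show ¬ M ≤ 1 by omega, Nat.div_self (show 0 < M by omega), pvSpec_one]

theorem loopB_spec : ∀ (fuel D M : Nat) (s c : Int), 2 ≤ D → 1 ≤ M → M < fuel + D * D →
    (∀ k, 2 ≤ k → k < D → ¬ k ∣ M) →
    ∃ M' : Nat, pvLoopB fuel (D : Int) (M : Int) s c =
        (s + (pvSpec M).1 - (pvSpec M').1, c + (pvSpec M).2 - (pvSpec M').2, (M' : Int)) ∧
      1 ≤ M' ∧ (M' = 1 ∨ (2 ≤ M' ∧ pvSpec M' = ((M' : Int), 1))) := by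
  intro fuel
  induction fuel with
  | zero =>
    intro D M s c hD hM hf hmin
    refine ⟨M, ?_, hM, exitB D M hD hM (by omega) hmin⟩
    rw [pvLoopB]
    simp
  | succ f ih =>
    intro D M s c hD hM hf hmin
    by_cases hguard : D * D ≤ M
    · have hguard' : ((D : Int)) * (D : Int) ≤ (M : Int) := by exact_mod_cast hguard
      by_cases hdvd : D ∣ M
      · have hmod : PySem.Int.mod (M : Int) (D : Int) = 0 := by
          rw [PySem.Int.mod_eq_zero_iff_dvd]; exact_mod_cast hdvd
        have hfd : PySem.Int.floordiv (M : Int) (D : Int) = ((M / D : Nat) : Int) :=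
          PySem.Int.floordiv_natCast M D
        have h4 : 4 ≤ M := by nlinarith
        have hhalf : M / D ≤ M / 2 := Nat.div_le_div_left hD (by omega)
        have h1 : 1 ≤ M / D := (Nat.one_le_div_iff (by omega)).mpr (Nat.le_of_dvd (by omega) hdvd)
        have hmin' : ∀ k, 2 ≤ k → k < D → ¬ k ∣ M / D := by
          intro k hk2 hkD hkd
          exact hmin k hk2 hkD (hkd.trans (Nat.div_dvd_of_dvd hdvd))
        obtain ⟨M', heq, h1', hres⟩ :=
          ih D (M / D) (s + D) (c + 1) hD h1 (by omega) hmin'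
        refine ⟨M', ?_, h1', hres⟩
        rw [pvLoopB, if_pos hguard', if_pos hmod, hfd, heq,
          pvSpec_step M D hD hdvd (by omega) hmin]
        simp [Prod.ext_iff]
        constructor <;> ring
      · have hmod : ¬ PySem.Int.mod (M : Int) (D : Int) = 0 := by
          rw [PySem.Int.mod_eq_zero_iff_dvd]; exact_mod_cast hdvd
        have hmin' : ∀ k, 2 ≤ k → k < D + 1 → ¬ k ∣ M := by
          intro k hk2 hkD
          by_cases h : k < D
          · exact hmin k hk2 h
          · have : k = D := by omega
            rw [this]; exact hdvd
        obtain ⟨M', heq, h1', hres⟩ :=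
          ih (D + 1) M s c (by omega) hM
            (by have : D * D + 1 ≤ (D + 1) * (D + 1) := by nlinarith
                omega) hmin'
        refine ⟨M', ?_, h1', hres⟩
        rw [pvLoopB, if_pos hguard', if_neg hmod]
        have : ((D : Int)) + 1 = (((D + 1 : Nat)) : Int) := by push_cast; ring
        rw [this, heq]
    · refine ⟨M, ?_, hM, exitB D M hD hM (by omega) hmin⟩
      rw [pvLoopB, if_neg (by exact_mod_cast hguard)]
      simp

theorem main_pos (n : Int) (hn : 2 ≤ n) : divsSumAndCount n = divsSumAndCount_alt n := by
  set N := n.toNat with hN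
  have hcast : (N : Int) = n := Int.toNat_of_nonneg (by omega)
  have hN2 : 2 ≤ N := by omega
  -- A side
  have hA : divsSumAndCount n = [(pvSpec N).1, (pvSpec N).2] := by
    unfold divsSumAndCount
    have hrange : PySem.List.pyRange 2 (n + 1) 1
        = PySem.List.pyRange ((2 : Nat) : Int) (((2 : Nat) : Int) + ((N - 1 : Nat) : Int)) 1 := by
      congr 1
      push_cast
      omega
    rw [hrange]
    have := foldA_spec (N - 1) 2 0 0 N (by omega) (by omega) (by omega)
      (by intro k hk2 hk; omega)
    rw [show ((N : Int)) = n from hcast] at this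
    rw [this]
    simp
  -- B side
  have hB : divsSumAndCount_alt n = [(pvSpec N).1, (pvSpec N).2] := by
    unfold divsSumAndCount_alt
    obtain ⟨M', heq, h1', hres⟩ :=
      loopB_spec (N + 1) 2 N 0 0 (by omega) (by omega) (by omega)
      (by intro k hk2 hk; omega)
    rw [show ((2 : Nat) : Int) = (2 : Int) by norm_num, hcast] at heq
    rw [hN, heq]
    rcases hres with h1 | ⟨h2, hsp⟩
    · subst h1
      simp [pvSpec_one]
      exact ⟨rfl, rfl⟩
    · rw [if_pos (by simp; exact_mod_cast h2)]
      rw [hsp]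
      simp
      constructor <;> ring
  rw [hA, hB]

theorem main_nonpos (n : Int) (hn : n ≤ 1) : divsSumAndCount n = divsSumAndCount_alt n := by
  have hA : divsSumAndCount n = [0, 0] := by
    unfold divsSumAndCount
    rw [PySem.List.pyRange_one_eq_nil (by omega : n + 1 ≤ 2)]
    simp
  have hB : divsSumAndCount_alt n = [0, 0] := by
    unfold divsSumAndCount_alt
    rw [pvLoopB, if_neg (by omega : ¬ (2 : Int) * 2 ≤ n)]
    simp
    omega
  rw [hA, hB]

-- ===== VERDICT (by name: the statement is the Claim_ definition above) =====
theorem divsSumAndCount_spec : Claim_equal_divsSumAndCount := by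
  intro n _
  unfold Spec_divsSumAndCount
  by_cases h : 2 ≤ n
  · exact main_pos n h
  · exact main_nonpos n (by omega)
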